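-- pv_equiv track=rewrite | github.com/Gabrlie/BZYAgent | backend/app/teaching_plan_service.py | build_schedule_frame
-- ===== SOURCE A (Python) =====
-- from typing import Dict, Any, List, Optional
--
-- def _get_week_class_limit(week: int, first_week_classes: int, classes_per_week: int) -> int:
--     if week == 1:
--         return first_week_classes
--     return classes_per_week
--
-- def build_schedule_frame(
--     total_weeks: int,
--     classes_per_week: int,
--     actual_classes: int,
--     first_week_classes: int,
--     skip_slots: Optional[List[Dict[str, Any]]] = None,
-- ) -> List[Dict[str, int]]:
--     """
--     系统排课规则：
--     - 第 1 周上 first_week_classes 次课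
--     - 其余周按 classes_per_week 次课
--     - skip_slots 指定哪一周哪一次不上课
--     - 依次填充，直到排满 actual_classes 次课
--     返回: [{"order": 1, "week": 1}, ...]
--     """
--     if total_weeks < 1 or classes_per_week < 1:
--         return []
--
--     classes_per_week = max(1, min(7, classes_per_week))
--     first_week_classes = max(1, min(classes_per_week, first_week_classes))
--
--     skip_set = set()
--     for item in skip_slots or []:
--         try:
--             week = int(item.get('week'))
--             class_index = item.get('class') or item.get('class_index') or item.get('session')
--             class_index = int(class_index)
--         except Exception:
--             continue
--         week_limit = _get_week_class_limit(week, first_week_classes, classes_per_week)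
--         if 1 <= week <= total_weeks and 1 <= class_index <= week_limit:
--             skip_set.add((week, class_index))
--
--     schedule: List[Dict[str, int]] = []
--     for week in range(1, total_weeks + 1):
--         week_limit = _get_week_class_limit(week, first_week_classes, classes_per_week)
--         for class_index in range(1, week_limit + 1):
--             if (week, class_index) in skip_set:
--                 continue
--             schedule.append({"order": len(schedule) + 1, "week": week})
--             if len(schedule) >= actual_classes:
--                 return schedule
--     return schedule
-- ===== SOURCE B (Python) =====
-- from typing import Dict, Any, List, Optional
--
-- def build_schedule_frame(
--     total_weeks: int,
--     classes_per_week: int,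
--     actual_classes: int,
--     first_week_classes: int,
--     skip_slots: Optional[List[Dict[str, Any]]] = None,
-- ) -> List[Dict[str, int]]:
--     if total_weeks < 1 or classes_per_week < 1:
--         return []
--
--     classes_per_week = max(1, min(7, classes_per_week))
--     first_week_classes = max(1, min(classes_per_week, first_week_classes))
--
--     skip_set = set()
--     for item in skip_slots or []:
--         try:
--             week = int(item.get('week'))
--             class_index = item.get('class') or item.get('class_index') or item.get('session')
--             class_index = int(class_index)
--         except Exception:
--             continue
--         week_limit = first_week_classes if week == 1 else classes_per_week
--         if 1 <= week <= total_weeks and 1 <= class_index <= week_limit: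
--             skip_set.add((week, class_index))
--
--     # Per-week aggregation: emit a block of identical-shape entries per week
--     # instead of testing each slot against the skip set.
--     target = max(1, actual_classes)
--     schedule: List[Dict[str, int]] = []
--     for week in range(1, total_weeks + 1):
--         if len(schedule) >= target:
--             break
--         week_limit = first_week_classes if week == 1 else classes_per_week
--         skipped = sum(1 for (w, _) in skip_set if w == week)
--         available = min(week_limit - skipped, target - len(schedule))
--         for _ in range(available):
--             schedule.append({"order": len(schedule) + 1, "week": week})
--     return schedule
-- ===== Notes on version B (the rewrite author's own statement) =====
-- stated objective: simpler
-- what changed: The nested per-slot loop with a membership test on every (week, class_index) is replaced by a per-week aggregation: count the week's skip entries once, emit the whole block of min(week_limit - skipped, target - len) entries, and break when the target max(1, actual_classes) is reached.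
import Mathlib
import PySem

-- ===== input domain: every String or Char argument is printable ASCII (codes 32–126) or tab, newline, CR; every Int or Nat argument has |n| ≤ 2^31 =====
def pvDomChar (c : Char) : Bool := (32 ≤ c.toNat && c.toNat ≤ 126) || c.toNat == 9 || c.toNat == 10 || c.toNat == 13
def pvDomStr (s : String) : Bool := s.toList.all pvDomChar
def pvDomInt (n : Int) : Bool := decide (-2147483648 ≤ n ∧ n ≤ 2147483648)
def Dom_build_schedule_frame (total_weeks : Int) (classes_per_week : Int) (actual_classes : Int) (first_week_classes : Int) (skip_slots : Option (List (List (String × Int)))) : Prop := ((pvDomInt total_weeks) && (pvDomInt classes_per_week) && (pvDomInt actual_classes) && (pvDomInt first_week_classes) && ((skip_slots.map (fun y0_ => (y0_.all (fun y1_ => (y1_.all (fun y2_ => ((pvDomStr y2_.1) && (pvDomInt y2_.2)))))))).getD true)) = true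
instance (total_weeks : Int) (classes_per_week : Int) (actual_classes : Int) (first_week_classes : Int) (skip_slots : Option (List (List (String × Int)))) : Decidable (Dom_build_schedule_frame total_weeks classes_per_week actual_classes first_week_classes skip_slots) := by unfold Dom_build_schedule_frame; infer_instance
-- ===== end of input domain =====

-- ===== PORT A =====
-- B replaces A's per-slot inner loop by a per-week block emission (simpler decomposition); same return value.
def pvWeekLimit (week first_week_classes classes_per_week : Int) : Int :=
  if week = 1 then first_week_classes else classes_per_week

-- Python 'x or y' on Optional[int]: None and 0 are falsy
def pvOr (a b : Option Int) : Option Int :=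
  match a with
  | some x => if x = 0 then b else some x
  | none => b

-- the skip_set construction loop (identical in A and in B, kept verbatim per B's design)
def pvSkipSet (total_weeks classes_per_week first_week_classes : Int)
    (items : List (List (String × Int))) : PySem.Set (Int × Int) :=
  items.foldl (fun s item =>
    match (PySem.Dict.mk item).get? "week" with
    | none => s  -- int(None) raises -> continue
    | some week =>
      match pvOr (pvOr ((PySem.Dict.mk item).get? "class") ((PySem.Dict.mk item).get? "class_index"))
          ((PySem.Dict.mk item).get? "session") with
      | none => s  -- int(None) raises -> continue
      | some class_index =>
        let week_limit := pvWeekLimit week first_week_classes classes_per_week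
        if 1 ≤ week ∧ week ≤ total_weeks ∧ 1 ≤ class_index ∧ class_index ≤ week_limit then
          PySem.Set.add s (week, class_index)
        else s) PySem.Set.empty

-- inner 'for class_index in range(1, week_limit+1)' loop; Bool = "early return taken"
def pvInnerA (week : Int) (skip : PySem.Set (Int × Int)) (actual_classes : Int) :
    List Int → List (List (String × Int)) → List (List (String × Int)) × Bool
  | [], schedule => (schedule, false)
  | class_index :: rest, schedule =>
    if skip.contains (week, class_index) then
      pvInnerA week skip actual_classes rest schedule
    else
      let schedule' := schedule ++ [[("order", (schedule.length : Int) + 1), ("week", week)]]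
      if actual_classes ≤ (schedule'.length : Int) then (schedule', true)
      else pvInnerA week skip actual_classes rest schedule'

-- outer 'for week in range(1, total_weeks+1)' loop
def pvOuterA (classes_per_week first_week_classes actual_classes : Int)
    (skip : PySem.Set (Int × Int)) :
    List Int → List (List (String × Int)) → List (List (String × Int))
  | [], schedule => schedule
  | week :: rest, schedule =>
    let week_limit := pvWeekLimit week first_week_classes classes_per_week
    let r := pvInnerA week skip actual_classes (PySem.List.pyRange 1 (week_limit + 1)) schedule
    if r.2 then r.1
    else pvOuterA classes_per_week first_week_classes actual_classes skip rest r.1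

def build_schedule_frame (total_weeks : Int) (classes_per_week : Int) (actual_classes : Int) (first_week_classes : Int) (skip_slots : Option (List (List (String × Int)))) : List (List (String × Int)) :=
  if total_weeks < 1 ∨ classes_per_week < 1 then []
  else
    let cpw := max 1 (min 7 classes_per_week)
    let fwc := max 1 (min cpw first_week_classes)
    let skip := pvSkipSet total_weeks cpw fwc (skip_slots.getD [])
    pvOuterA cpw fwc actual_classes skip (PySem.List.pyRange 1 (total_weeks + 1)) []

-- ===== PORT B =====
-- per-week aggregation loop: count this week's skips once, emit a whole block, stop at target
def pvLoopB (classes_per_week first_week_classes target : Int) (skip : PySem.Set (Int × Int)) :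
    List Int → List (List (String × Int)) → List (List (String × Int))
  | [], schedule => schedule
  | week :: rest, schedule =>
    if target ≤ (schedule.length : Int) then schedule  -- break
    else
      let week_limit := if week = 1 then first_week_classes else classes_per_week
      let skipped : Int := ((skip.filter (fun p => p.1 == week)).length : Int)
      let available := min (week_limit - skipped) (target - (schedule.length : Int))
      let schedule' := (PySem.List.pyRange 0 available).foldl
        (fun sch _ => sch ++ [[("order", (sch.length : Int) + 1), ("week", week)]]) schedule
      pvLoopB classes_per_week first_week_classes target skip rest schedule'

def build_schedule_frame_alt (total_weeks : Int) (classes_per_week : Int) (actual_classes : Int) (first_week_classes : Int) (skip_slots : Option (List (List (String × Int)))) : List (List (String × Int)) :=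
  if total_weeks < 1 ∨ classes_per_week < 1 then []
  else
    let cpw := max 1 (min 7 classes_per_week)
    let fwc := max 1 (min cpw first_week_classes)
    let skip := pvSkipSet total_weeks cpw fwc (skip_slots.getD [])
    let target := max 1 actual_classes
    pvLoopB cpw fwc target skip (PySem.List.pyRange 1 (total_weeks + 1)) []

-- ===== PRECONDITION & SPEC =====
def Spec_build_schedule_frame (total_weeks : Int) (classes_per_week : Int) (actual_classes : Int) (first_week_classes : Int) (skip_slots : Option (List (List (String × Int)))) (out : List (List (String × Int))) : Prop := out = build_schedule_frame_alt total_weeks classes_per_week actual_classes first_week_classes skip_slots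
instance (total_weeks : Int) (classes_per_week : Int) (actual_classes : Int) (first_week_classes : Int) (skip_slots : Option (List (List (String × Int)))) (out : List (List (String × Int))) : Decidable (Spec_build_schedule_frame total_weeks classes_per_week actual_classes first_week_classes skip_slots out) := by unfold Spec_build_schedule_frame; infer_instance

-- ===== CLAIM (what is proved, stated in full; the proofs are below) =====
def Claim_equal_build_schedule_frame : Prop := ∀ (total_weeks : Int) (classes_per_week : Int) (actual_classes : Int) (first_week_classes : Int) (skip_slots : Option (List (List (String × Int)))), Dom_build_schedule_frame total_weeks classes_per_week actual_classes first_week_classes skip_slots → Spec_build_schedule_frame total_weeks classes_per_week actual_classes first_week_classes skip_slots (build_schedule_frame total_weeks classes_per_week actual_classes first_week_classes skip_slots)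

-- ===== LEMMAS AND PROOFS =====

-- the block of entries appended for one week: j entries with orders n+1, n+2, …
def pvEmit (n : Nat) (w : Int) : Nat → List (List (String × Int))
  | 0 => []
  | j + 1 => [("order", (n : Int) + 1), ("week", w)] :: pvEmit (n + 1) w j

lemma pvEmit_succ (n : Nat) (w : Int) (j : Nat) :
    pvEmit n w (j + 1) = [("order", (n : Int) + 1), ("week", w)] :: pvEmit (n + 1) w j := rfl

lemma pvEmit_length (n : Nat) (w : Int) (j : Nat) : (pvEmit n w j).length = j := by
  induction j generalizing n with
  | zero => rfl
  | succ j ih => simp [pvEmit, ih]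

lemma pyRange_one_length (b : Int) : (PySem.List.pyRange 1 b).length = (b - 1).toNat := by
  rw [PySem.List.pyRange_of_pos 1 b Int.zero_lt_one]
  simp only [List.length_map, List.length_range]
  split_ifs with h
  · norm_num
  · omega

lemma pyRange_zero_length (b : Int) : (PySem.List.pyRange 0 b).length = b.toNat := by
  rw [PySem.List.pyRange_of_pos 0 b Int.zero_lt_one]
  simp only [List.length_map, List.length_range]
  split_ifs with h
  · norm_num
  · omega

lemma pyRange_nodup (a b : Int) : (PySem.List.pyRange a b).Nodup := by
  rw [PySem.List.pyRange_of_pos a b Int.zero_lt_one]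
  refine List.Nodup.map_on (fun x _ y _ h => ?_) List.nodup_range
  omega

-- B's emission fold appends exactly the pvEmit block
lemma foldB_emit (w : Int) (L : List Int) : ∀ (sch : List (List (String × Int))),
    L.foldl (fun sch _ => sch ++ [[("order", (sch.length : Int) + 1), ("week", w)]]) sch
      = sch ++ pvEmit sch.length w L.length := by
  induction L with
  | nil => intro sch; simp [pvEmit]
  | cons a L ih =>
      intro sch
      simp only [List.foldl_cons, List.length_cons, ih, List.length_append, List.length_cons,
        List.length_nil]
      rw [pvEmit_succ]
      simp

-- the number of skip-set entries of week w equals the number of skipped slots in 1..wl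
lemma skipped_count (S : PySem.Set (Int × Int)) (hnd : S.Nodup) (w wl : Int)
    (hb : ∀ p ∈ S, p.1 = w → 1 ≤ p.2 ∧ p.2 ≤ wl) :
    ((S.filter (fun p => p.1 == w)).map Prod.snd).Perm
      ((PySem.List.pyRange 1 (wl + 1)).filter (fun ci => S.contains (w, ci))) := by
  rw [List.perm_ext_iff_of_nodup]
  · intro x
    simp only [List.mem_map, List.mem_filter, PySem.Set.contains, List.contains_iff_mem, PySem.List.mem_pyRange_one, beq_iff_eq]
    constructor
    · rintro ⟨⟨pw, px⟩, ⟨hp, hw⟩, rfl⟩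
      simp only at hw; subst hw
      have := hb _ hp rfl
      exact ⟨⟨this.1, by omega⟩, hp⟩
    · rintro ⟨⟨h1, h2⟩, hm⟩
      exact ⟨(w, x), ⟨hm, rfl⟩, rfl⟩
  · refine List.Nodup.map_on (fun x hx y hy hxy => ?_) (hnd.filter _)
    have hxw : x.1 = w := by simpa using (List.mem_filter.mp hx).2
    have hyw : y.1 = w := by simpa using (List.mem_filter.mp hy).2
    exact Prod.ext (hxw.trans hyw.symm) hxy
  · exact (pyRange_nodup 1 (wl + 1)).filter _

-- invariants of the skip set: distinct elements, each within its week limit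
lemma pvSkipSet_inv (total_weeks classes_per_week first_week_classes : Int)
    (items : List (List (String × Int))) :
    (pvSkipSet total_weeks classes_per_week first_week_classes items).Nodup ∧
      ∀ p ∈ pvSkipSet total_weeks classes_per_week first_week_classes items,
        1 ≤ p.2 ∧ p.2 ≤ pvWeekLimit p.1 first_week_classes classes_per_week := by
  have main : ∀ (l : List (List (String × Int))) (s : PySem.Set (Int × Int)), s.Nodup →
      (∀ p ∈ s, 1 ≤ p.2 ∧ p.2 ≤ pvWeekLimit p.1 first_week_classes classes_per_week) →
      (l.foldl (fun s item =>
        match (PySem.Dict.mk item).get? "week" with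
        | none => s
        | some week =>
          match pvOr (pvOr ((PySem.Dict.mk item).get? "class") ((PySem.Dict.mk item).get? "class_index"))
              ((PySem.Dict.mk item).get? "session") with
          | none => s
          | some class_index =>
            let week_limit := pvWeekLimit week first_week_classes classes_per_week
            if 1 ≤ week ∧ week ≤ total_weeks ∧ 1 ≤ class_index ∧ class_index ≤ week_limit then
              PySem.Set.add s (week, class_index)
            else s) s).Nodup ∧
      ∀ p ∈ (l.foldl (fun s item =>
        match (PySem.Dict.mk item).get? "week" with
        | none => s
        | some week =>
          match pvOr (pvOr ((PySem.Dict.mk item).get? "class") ((PySem.Dict.mk item).get? "class_index"))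
              ((PySem.Dict.mk item).get? "session") with
          | none => s
          | some class_index =>
            let week_limit := pvWeekLimit week first_week_classes classes_per_week
            if 1 ≤ week ∧ week ≤ total_weeks ∧ 1 ≤ class_index ∧ class_index ≤ week_limit then
              PySem.Set.add s (week, class_index)
            else s) s),
        1 ≤ p.2 ∧ p.2 ≤ pvWeekLimit p.1 first_week_classes classes_per_week := by
    intro l
    induction l with
    | nil => intro s h1 h2; exact ⟨h1, h2⟩
    | cons item rest ih =>
        intro s h1 h2
        simp only [List.foldl_cons]
        rcases hwk : (PySem.Dict.mk item).get? "week" with _ | week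
        · exact ih s h1 h2
        rcases hci : pvOr (pvOr ((PySem.Dict.mk item).get? "class") ((PySem.Dict.mk item).get? "class_index"))
            ((PySem.Dict.mk item).get? "session") with _ | class_index
        · exact ih s h1 h2
        by_cases hc : 1 ≤ week ∧ week ≤ total_weeks ∧ 1 ≤ class_index ∧
            class_index ≤ pvWeekLimit week first_week_classes classes_per_week
        · simp only [hc]
          refine ih _ (PySem.Set.nodup_add s _ h1) ?_
          intro p hp
          rcases (PySem.Set.mem_add s _ p).mp hp with h | h
          · exact h2 p h
          · subst h; exact ⟨hc.2.2.1, hc.2.2.2⟩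
        · simp only [hc, if_false]
          exact ih s h1 h2
  exact main items PySem.Set.empty (by simp [PySem.Set.empty]) (by simp [PySem.Set.empty])

-- characterisation of A's inner loop
lemma innerA_spec (w ac : Int) (S : PySem.Set (Int × Int)) :
    ∀ (L : List Int) (sch : List (List (String × Int))), (sch.length : Int) < max 1 ac →
    pvInnerA w S ac L sch =
      (sch ++ pvEmit sch.length w
          (min (L.countP (fun ci => !(S.contains (w, ci)))) ((max 1 ac - (sch.length : Int)).toNat)),
        decide ((max 1 ac - (sch.length : Int)).toNat ≤ L.countP (fun ci => !(S.contains (w, ci))))) := by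
  intro L
  induction L with
  | nil =>
      intro sch h
      have h0 : (max 1 ac - (sch.length : Int)).toNat ≠ 0 := by omega
      simp [pvInnerA, pvEmit]
      omega
  | cons ci rest ih =>
      intro sch h
      by_cases hskip : S.contains (w, ci) = true
      · have hmem : (w, ci) ∈ S := by simpa using hskip
        have hunf : pvInnerA w S ac (ci :: rest) sch = pvInnerA w S ac rest sch := by
          simp [pvInnerA, hmem]
        rw [hunf, ih sch h]
        simp [hmem]
      · have hskip' : S.contains (w, ci) = false := by simpa using hskip
        have hmem : (w, ci) ∉ S := by simpa using hskip
        have hcnt : List.countP (fun c => !(S.contains (w, c))) (ci :: rest)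
            = List.countP (fun c => !(S.contains (w, c))) rest + 1 := by
          simp [hmem]
        have hL : ((sch ++ [[("order", (sch.length : Int) + 1), ("week", w)]]).length : Int)
            = (sch.length : Int) + 1 := by simp
        have hunf : pvInnerA w S ac (ci :: rest) sch
            = (if ac ≤ ((sch ++ [[("order", (sch.length : Int) + 1), ("week", w)]]).length : Int)
               then ((sch ++ [[("order", (sch.length : Int) + 1), ("week", w)]]), true)
               else pvInnerA w S ac rest
                 (sch ++ [[("order", (sch.length : Int) + 1), ("week", w)]])) := by
          simp [pvInnerA, hmem]
        rw [hunf, hcnt]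
        by_cases hdone : ac ≤ (sch.length : Int) + 1
        · rw [if_pos (by rw [hL]; exact hdone)]
          have hneed : (max 1 ac - (sch.length : Int)).toNat = 1 := by omega
          rw [hneed]
          have hmin : min (List.countP (fun c => !(S.contains (w, c))) rest + 1) 1 = 1 := by omega
          rw [hmin]
          simp only [Prod.mk.injEq]
          constructor
          · simp [pvEmit]
          · simp
        · rw [if_neg (by rw [hL]; omega)]
          have h' : ((sch ++ [[("order", (sch.length : Int) + 1), ("week", w)]]).length : Int)
              < max 1 ac := by rw [hL]; omega
          rw [ih _ h']
          have hlen2 : (sch ++ [[("order", (sch.length : Int) + 1), ("week", w)]]).length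
              = sch.length + 1 := by simp
          rw [hlen2]
          have hmin : min (List.countP (fun c => !(S.contains (w, c))) rest + 1)
                ((max 1 ac - (sch.length : Int)).toNat)
              = (min (List.countP (fun c => !(S.contains (w, c))) rest)
                ((max 1 ac - ((sch.length : Nat) + 1 : Nat) : Int).toNat)) + 1 := by
            push_cast
            omega
          rw [hmin, pvEmit_succ]
          simp only [Prod.mk.injEq]
          constructor
          · rw [List.append_assoc, List.singleton_append]
          · rw [decide_eq_decide]
            push_cast
            omega

-- B's loop is a no-op once the target is reached
lemma loopB_done (cpw fwc target : Int) (S : PySem.Set (Int × Int))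
    (weeks : List Int) (sch : List (List (String × Int)))
    (h : target ≤ (sch.length : Int)) :
    pvLoopB cpw fwc target S weeks sch = sch := by
  cases weeks with
  | nil => rfl
  | cons w rest => simp [pvLoopB, h]

-- main loop correspondence
lemma outer_eq (cpw fwc ac : Int) (S : PySem.Set (Int × Int))
    (hcpw : 1 ≤ cpw) (hfwc : 1 ≤ fwc) (hnd : S.Nodup)
    (hb : ∀ p ∈ S, 1 ≤ p.2 ∧ p.2 ≤ pvWeekLimit p.1 fwc cpw) :
    ∀ (weeks : List Int) (sch : List (List (String × Int))),
      (sch.length : Int) < max 1 ac →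
      pvOuterA cpw fwc ac S weeks sch = pvLoopB cpw fwc (max 1 ac) S weeks sch := by
  intro weeks
  induction weeks with
  | nil => intro sch h; rfl
  | cons w rest ih =>
      intro sch h
      have hwl1 : 1 ≤ pvWeekLimit w fwc cpw := by unfold pvWeekLimit; split <;> omega
      have hmk : List.countP (fun ci => !(S.contains (w, ci)))
            (PySem.List.pyRange 1 (pvWeekLimit w fwc cpw + 1))
          + List.countP (fun ci => S.contains (w, ci))
            (PySem.List.pyRange 1 (pvWeekLimit w fwc cpw + 1))
          = (pvWeekLimit w fwc cpw).toNat := by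
        have hlen := List.length_eq_countP_add_countP (fun ci => S.contains (w, ci))
          (l := PySem.List.pyRange 1 (pvWeekLimit w fwc cpw + 1))
        have hcg : List.countP (fun a => decide ¬((fun ci => S.contains (w, ci)) a = true))
              (PySem.List.pyRange 1 (pvWeekLimit w fwc cpw + 1))
            = List.countP (fun ci => !(S.contains (w, ci)))
              (PySem.List.pyRange 1 (pvWeekLimit w fwc cpw + 1)) :=
          List.countP_congr (fun a _ => by by_cases hm : (w, a) ∈ S <;> simp [hm])
        rw [hcg, pyRange_one_length] at hlen
        omega
      have hskc : ((S.filter (fun p => p.1 == w)).length)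
          = List.countP (fun ci => S.contains (w, ci))
            (PySem.List.pyRange 1 (pvWeekLimit w fwc cpw + 1)) := by
        have hperm := skipped_count S hnd w (pvWeekLimit w fwc cpw) (fun p hp hpw => by
          have := hb p hp; rw [hpw] at this; exact this)
        have hlp := hperm.length_eq
        simpa [List.countP_eq_length_filter] using hlp
      -- A side
      simp only [pvOuterA]
      rw [innerA_spec w ac S _ sch h]
      dsimp only
      -- B side
      simp only [pvLoopB]
      rw [if_neg (not_le.mpr h)]
      rw [show (if w = 1 then fwc else cpw) = pvWeekLimit w fwc cpw from rfl]
      rw [foldB_emit, pyRange_zero_length]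
      have havail : (min (pvWeekLimit w fwc cpw - ((S.filter (fun p => p.1 == w)).length : Int))
            (max 1 ac - (sch.length : Int))).toNat
          = min (List.countP (fun ci => !(S.contains (w, ci)))
              (PySem.List.pyRange 1 (pvWeekLimit w fwc cpw + 1)))
            ((max 1 ac - (sch.length : Int)).toNat) := by
        have hskcZ : (((S.filter (fun p => p.1 == w)).length : Nat) : Int)
            = ((List.countP (fun ci => S.contains (w, ci))
              (PySem.List.pyRange 1 (pvWeekLimit w fwc cpw + 1)) : Nat) : Int) := by
          exact_mod_cast hskc
        rw [hskcZ]
        omega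
      rw [havail]
      by_cases hflag : (max 1 ac - (sch.length : Int)).toNat
          ≤ List.countP (fun ci => !(S.contains (w, ci)))
              (PySem.List.pyRange 1 (pvWeekLimit w fwc cpw + 1))
      · rw [if_pos (decide_eq_true hflag)]
        rw [loopB_done _ _ _ _ _ _ (by simp only [List.length_append, pvEmit_length]; omega)]
      · rw [if_neg (fun hc => hflag (of_decide_eq_true hc))]
        apply ih
        simp only [List.length_append, pvEmit_length]
        push_cast
        omega

-- ===== VERDICT (by name: the statement is the Claim_ definition above) =====
theorem build_schedule_frame_spec : Claim_equal_build_schedule_frame := by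
  intro tw cpw ac fwc ss _
  unfold Spec_build_schedule_frame build_schedule_frame build_schedule_frame_alt
  by_cases h : tw < 1 ∨ cpw < 1
  · simp [h]
  · simp only [h, if_false]
    obtain ⟨hnd, hb⟩ := pvSkipSet_inv tw (max 1 (min 7 cpw))
      (max 1 (min (max 1 (min 7 cpw)) fwc)) (ss.getD [])
    exact outer_eq _ _ ac _ (by omega) (by omega) hnd hb _ [] (by simp)
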